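-- pv_equiv track=rewrite | github.com/BrettRey/erdos-problem-993 | conjecture_a_spider_mode_tie_asymptotic.py | exact_mode_s2k
-- ===== SOURCE A (Python) =====
-- import math
--
-- def coeff_s2k(k: int, j: int) -> int:
--     """Coefficient i_j of I(S(2^k); x) = (1+2x)^k + x(1+x)^k."""
--     t1 = math.comb(k, j) * (1 << j) if 0 <= j <= k else 0
--     t2 = math.comb(k, j - 1) if 1 <= j <= k + 1 else 0
--     return t1 + t2
--
-- def exact_mode_s2k(k: int) -> int:
--     """Leftmost mode by exact coefficient scan (O(k))."""
--     best_j = 0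
--     best_v = coeff_s2k(k, 0)
--     for j in range(1, k + 2):
--         v = coeff_s2k(k, j)
--         if v > best_v:
--             best_v = v
--             best_j = j
--     return best_j
-- ===== SOURCE B (Python) =====
-- def exact_mode_s2k(k: int) -> int:
--     """Leftmost mode via a single pass with incremental binomial/power updates (no comb calls)."""
--     if k < 0:
--         return 0
--     best_j, best_v = 0, 1  # coefficient at j=0 is comb(k,0)*2**0 = 1
--     c, p = 1, 1            # c = comb(k, j), p = 2**j, updated incrementally
--     for j in range(1, k + 2):
--         c_prev = c
--         c = c * (k - j + 1) // j   # comb(k,j) from comb(k,j-1); gives 0 at j = k+1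
--         p += p
--         v = c * p + c_prev
--         if v > best_v:
--             best_j, best_v = j, v
--     return best_j
-- ===== Notes on version B (the rewrite author's own statement) =====
-- stated objective: faster
-- what changed: Replaces per-index math.comb and 1<<j recomputation with a single pass maintaining comb(k,j), comb(k,j-1) and 2^j incrementally (comb(k,j)=comb(k,j-1)*(k-j+1)//j, p+=p).
import Mathlib
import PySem

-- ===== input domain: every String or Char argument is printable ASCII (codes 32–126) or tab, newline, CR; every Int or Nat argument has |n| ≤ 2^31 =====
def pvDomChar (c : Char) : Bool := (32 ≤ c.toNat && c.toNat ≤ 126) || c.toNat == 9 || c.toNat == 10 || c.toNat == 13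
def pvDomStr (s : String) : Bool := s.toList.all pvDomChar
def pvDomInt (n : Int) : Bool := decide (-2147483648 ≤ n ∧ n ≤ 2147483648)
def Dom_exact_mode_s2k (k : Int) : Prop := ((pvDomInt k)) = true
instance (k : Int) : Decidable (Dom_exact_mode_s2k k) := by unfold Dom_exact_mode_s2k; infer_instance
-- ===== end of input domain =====

-- B replaces A's per-index math.comb and 1<<j recomputation by one pass updating
-- comb(k,j), comb(k,j-1) and 2^j incrementally: O(k) big-int operations instead of O(k^2).

-- ===== PORT A =====
-- math.comb(n, r): A only calls it with 0 ≤ n and 0 ≤ r, where it equals Nat.choose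
-- (Nat.choose n r = 0 for r > n, exactly like math.comb).
def pyComb (n r : Int) : Int := (Nat.choose n.toNat r.toNat : Int)

def coeff_s2k (k j : Int) : Int :=
  let t1 := if 0 ≤ j ∧ j ≤ k then pyComb k j * 2 ^ j.toNat else 0  -- 1 << j = 2^j (j ≥ 0 under the guard)
  let t2 := if 1 ≤ j ∧ j ≤ k + 1 then pyComb k (j - 1) else 0
  t1 + t2

def stepA (k : Int) (st : Int × Int) (j : Int) : Int × Int :=
  let v := coeff_s2k k j
  if v > st.2 then (j, v) else st

def exact_mode_s2k (k : Int) : Int :=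
  ((PySem.List.pyRange 1 (k + 2) 1).foldl (stepA k) (0, coeff_s2k k 0)).1

-- ===== PORT B =====
-- state (best_j, best_v, c, p): c = comb(k, j), p = 2^j, updated incrementally
def stepB (k : Int) (st : Int × Int × Int × Int) (j : Int) : Int × Int × Int × Int :=
  let cprev := st.2.2.1
  let c := PySem.Int.floordiv (cprev * (k - j + 1)) j
  let p := st.2.2.2 + st.2.2.2
  let v := c * p + cprev
  if v > st.2.1 then (j, v, c, p) else (st.1, st.2.1, c, p)

def exact_mode_s2k_alt (k : Int) : Int :=
  if k < 0 then 0
  else ((PySem.List.pyRange 1 (k + 2) 1).foldl (stepB k) (0, 1, 1, 1)).1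

-- ===== PRECONDITION & SPEC =====
def Spec_exact_mode_s2k (k : Int) (out : Int) : Prop := out = exact_mode_s2k_alt k
instance (k : Int) (out : Int) : Decidable (Spec_exact_mode_s2k k out) := by unfold Spec_exact_mode_s2k; infer_instance

-- ===== CLAIM (what is proved, stated in full; the proofs are below) =====
def Claim_equal_exact_mode_s2k : Prop := ∀ (k : Int), Dom_exact_mode_s2k k → Spec_exact_mode_s2k k (exact_mode_s2k k)

-- ===== LEMMAS AND PROOFS =====

-- incremental binomial update: comb(k,j-1)*(k-j+1) // j = comb(k,j)
theorem comb_step (n m : Nat) (h : m ≤ n) :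
    PySem.Int.floordiv ((n.choose m : Int) * ((n : Int) - ((m : Int) + 1) + 1)) ((m : Int) + 1)
      = (n.choose (m + 1) : Int) := by
  have h1 : (n : Int) - ((m : Int) + 1) + 1 = ((n - m : Nat) : Int) := by omega
  rw [h1]
  have h2 : (n.choose m : Int) * ((n - m : Nat) : Int) = (n.choose (m + 1) : Int) * ((m : Int) + 1) := by
    exact_mod_cast (Nat.choose_succ_right_eq n m).symm
  rw [h2, PySem.Int.floordiv_eq_ediv_of_pos (by positivity)]
  exact Int.mul_ediv_cancel _ (by positivity)

theorem coeff_zero (k : Int) (hk : 0 ≤ k) : coeff_s2k k 0 = 1 := by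
  simp [coeff_s2k, pyComb, hk]

-- coefficient at j = m+1, for m ≤ k: guarded t1 equals the unguarded product since choose vanishes past n
theorem coeff_succ (k : Int) (hk : 0 ≤ k) (m : Nat) (hm : (m : Int) ≤ k) :
    coeff_s2k k ((m : Int) + 1)
      = (k.toNat.choose (m + 1) : Int) * 2 ^ (m + 1) + (k.toNat.choose m : Int) := by
  have htn : ((m : Int) + 1).toNat = m + 1 := by omega
  have htn2 : ((m : Int) + 1 - 1).toNat = m := by omega
  unfold coeff_s2k pyComb
  rw [htn, htn2]
  by_cases hle : (m : Int) + 1 ≤ k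
  · simp [hle, hm]
    omega
  · have hmn : k.toNat < m + 1 := by omega
    rw [Nat.choose_eq_zero_of_lt hmn]
    simp
    omega

-- loop invariant: after the first m iterations B's state carries A's (best_j, best_v)
-- together with comb(k,m) and 2^m
theorem loop_inv (k : Int) (hk : 0 ≤ k) (m : Nat) (hm : (m : Int) ≤ k + 1) :
    (PySem.List.pyRange 1 ((m : Int) + 1) 1).foldl (stepB k) (0, 1, 1, 1)
      = (((PySem.List.pyRange 1 ((m : Int) + 1) 1).foldl (stepA k) (0, coeff_s2k k 0)).1,
         ((PySem.List.pyRange 1 ((m : Int) + 1) 1).foldl (stepA k) (0, coeff_s2k k 0)).2,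
         (k.toNat.choose m : Int), 2 ^ m) := by
  induction m with
  | zero =>
      rw [PySem.List.pyRange_one_eq_nil (by omega)]
      simp [coeff_zero k hk]
  | succ m ih =>
      have hm' : (m : Int) ≤ k + 1 := by push_cast at hm ⊢; omega
      have hrng : PySem.List.pyRange 1 ((m : Int) + 1 + 1) 1
          = PySem.List.pyRange 1 ((m : Int) + 1) 1 ++ [(m : Int) + 1] := by
        exact PySem.List.pyRange_one_succ_right (by omega)
      have hcast : ((m + 1 : Nat) : Int) + 1 = (m : Int) + 1 + 1 := by push_cast; ring
      rw [hcast, hrng, List.foldl_append, List.foldl_append, ih hm']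
      have hmk : m ≤ k.toNat := by omega
      have hstep := comb_step k.toNat m hmk
      have hkt : ((k.toNat : Int)) = k := by omega
      rw [hkt] at hstep
      simp only [List.foldl_cons, List.foldl_nil, stepB, stepA]
      rw [hstep, coeff_succ k hk m (by omega)]
      have hp : (2 : Int) ^ m + 2 ^ m = 2 ^ (m + 1) := by ring
      rw [hp]
      split_ifs <;> simp

-- ===== VERDICT (by name: the statement is the Claim_ definition above) =====
theorem exact_mode_s2k_spec : Claim_equal_exact_mode_s2k := by
  intro k _
  unfold Spec_exact_mode_s2k exact_mode_s2k exact_mode_s2k_alt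
  by_cases hneg : k < 0
  · rw [if_pos hneg, PySem.List.pyRange_one_eq_nil (by omega)]
    simp
  · rw [if_neg hneg]
    have hk : 0 ≤ k := by omega
    have hm : ((k + 1).toNat : Int) = k + 1 := by omega
    have := loop_inv k hk (k + 1).toNat (by omega)
    rw [hm] at this
    have h2 : k + 1 + 1 = k + 2 := by ring
    rw [h2] at this
    rw [this]
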